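-- pv_equiv track=rewrite | github.com/tangkong/pmps-ui | tooltips.py | get_ev_range_tooltip
-- ===== SOURCE A (Python) =====
-- from typing import Iterable
--
-- def preformatted(text: str) -> str:
--     """Return a rich text preformatted version of input."""
--     return f'<pre>{text}</pre>'
--
-- def get_ev_range_tooltip(bitmask: int, range_def: Iterable[int]) -> str:
--     """Return a suitable tooltip for an eV range bitmask."""
--     ok_bounds = []
--     bad_bounds = []
--     curr_ok_bound = None
--     curr_bad_bound = None
--     prev = 0
--
--     for bit, ev in enumerate(range_def):
--         ev = int(ev)
--         ok = (bitmask >> bit) % 2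
--         if ok:
--             if curr_ok_bound is None:
--                 curr_ok_bound = (prev, ev)
--             else:
--                 curr_ok_bound = (curr_ok_bound[0], ev)
--             if curr_bad_bound is not None:
--                 bad_bounds.append(curr_bad_bound)
--                 curr_bad_bound = None
--         else:
--             if curr_bad_bound is None:
--                 curr_bad_bound = (prev, ev)
--             else:
--                 curr_bad_bound = (curr_bad_bound[0], ev)
--             if curr_ok_bound is not None:
--                 ok_bounds.append(curr_ok_bound)
--                 curr_ok_bound = None
--         prev = ev
--
--     if curr_ok_bound is not None:
--         ok_bounds.append(curr_ok_bound)
--     if curr_bad_bound is not None: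
--         bad_bounds.append(curr_bad_bound)
--
--     left_width = 0
--     right_width = 0
--     lines = []
--     if not bad_bounds or (ok_bounds and len(ok_bounds) < len(bad_bounds)):
--         for left, right in ok_bounds:
--             left_width = max(left_width, len(str(left)))
--             right_width = max(right_width, len(str(right)))
--         for under, over in ok_bounds:
--             line = f'Allow {under:{left_width}} eV to {over:{right_width}} eV'
--             lines.append(line)
--     else:
--         for left, right in bad_bounds:
--             left_width = max(left_width, len(str(left)))
--             right_width = max(right_width, len(str(right)))
--         for under, over in bad_bounds:
--             line = f'Block {under:{left_width}} eV to {over:{right_width}} eV'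
--             lines.append(line)
--     return preformatted('\n'.join(lines))
-- ===== SOURCE B (Python) =====
-- from typing import Iterable
--
--
-- def preformatted(text: str) -> str:
--     """Return a rich text preformatted version of input."""
--     return f'<pre>{text}</pre>'
--
--
-- def get_ev_range_tooltip(bitmask: int, range_def: Iterable[int]) -> str:
--     """Return a suitable tooltip for an eV range bitmask."""
--     evs = [int(ev) for ev in range_def]
--     flags = [(bitmask >> bit) % 2 == 1 for bit, _ in enumerate(evs)]
--
--     def runs(t):
--         # A run of status t starts where the flag is t and the previous flag
--         # is not, and ends where the flag is t and the next flag is not;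
--         # pair the k-th start with the k-th end.
--         los = [lo for lo, f, p in zip([0] + evs, flags, [None] + flags)
--                if f == t and p != t]
--         his = [hi for hi, f, nx in zip(evs, flags, flags[1:] + [None])
--                if f == t and nx != t]
--         return list(zip(los, his))
--
--     ok_bounds, bad_bounds = runs(True), runs(False)
--     if not bad_bounds or (ok_bounds and len(ok_bounds) < len(bad_bounds)):
--         word, bounds = 'Allow', ok_bounds
--     else:
--         word, bounds = 'Block', bad_bounds
--     left_width = max((len(str(lo)) for lo, _ in bounds), default=0)
--     right_width = max((len(str(hi)) for _, hi in bounds), default=0)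
--     lines = [f'{word} {str(lo).rjust(left_width)} eV to {str(hi).rjust(right_width)} eV'
--              for lo, hi in bounds]
--     return preformatted('\n'.join(lines))
-- ===== Notes on version B (the rewrite author's own statement) =====
-- stated objective: alternative
-- what changed: A's one-pass four-variable state machine that accumulates both interval lists while tracking open bounds is replaced by staged passes: build the flag list once, detect run starts and run ends independently by comparing each flag with shifted copies of the list (zip with [None]+flags and flags[1:]+[None]), and zip the k-th start with the k-th end to form the intervals.
import Mathlib
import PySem

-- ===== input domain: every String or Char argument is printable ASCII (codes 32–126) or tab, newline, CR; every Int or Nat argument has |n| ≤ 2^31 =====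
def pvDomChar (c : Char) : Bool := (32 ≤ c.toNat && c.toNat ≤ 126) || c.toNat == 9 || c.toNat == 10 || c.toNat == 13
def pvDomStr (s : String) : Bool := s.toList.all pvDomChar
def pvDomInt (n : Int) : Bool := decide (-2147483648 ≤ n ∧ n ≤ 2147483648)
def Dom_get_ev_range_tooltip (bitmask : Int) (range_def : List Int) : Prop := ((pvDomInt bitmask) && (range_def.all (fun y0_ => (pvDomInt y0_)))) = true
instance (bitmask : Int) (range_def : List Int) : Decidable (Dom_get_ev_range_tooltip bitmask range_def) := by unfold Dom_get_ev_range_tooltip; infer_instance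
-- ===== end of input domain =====

-- B replaces A's one-pass four-variable interval state machine by staged passes: a flag
-- list, independent boundary detection of run starts / run ends against shifted copies of
-- that list, and a zip pairing them (objective: alternative decomposition; same cost).

-- shared helper: exact semantics of both f'{n:{w}}' on an int (A) and str(n).rjust(w) (B):
-- right-align str(n) in a field of w spaces
def pvPad (w : Nat) (n : Int) : List Char :=
  let s := PySem.Int.toChars n
  List.replicate (w - s.length) ' ' ++ s

-- shared helper: Python helper 'preformatted' used by both programs
def pvPreformatted (t : List Char) : String :=
  String.ofList ("<pre>".toList ++ t ++ "</pre>".toList)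

-- ===== PORT A =====
-- loop body of A: state = (ok_bounds, bad_bounds, curr_ok_bound, curr_bad_bound, prev)
def aStep (bitmask : Int)
    (st : List (Int × Int) × List (Int × Int) × Option (Int × Int) × Option (Int × Int) × Int)
    (p : Int × Int) :
    List (Int × Int) × List (Int × Int) × Option (Int × Int) × Option (Int × Int) × Int :=
  let ev := p.2
  if PySem.Int.mod (bitmask >>> p.1) 2 ≠ 0 then
    let co := match st.2.2.1 with
      | none => some (st.2.2.2.2, ev)
      | some c => some (c.1, ev)
    match st.2.2.2.1 with
    | some c => (st.1, st.2.1 ++ [c], co, none, ev)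
    | none => (st.1, st.2.1, co, none, ev)
  else
    let cb := match st.2.2.2.1 with
      | none => some (st.2.2.2.2, ev)
      | some c => some (c.1, ev)
    match st.2.2.1 with
    | some c => (st.1 ++ [c], st.2.1, none, cb, ev)
    | none => (st.1, st.2.1, none, cb, ev)

-- A after the loop: flush the pending bounds
def aFinish (st : List (Int × Int) × List (Int × Int) × Option (Int × Int) × Option (Int × Int) × Int) :
    List (Int × Int) × List (Int × Int) :=
  (match st.2.2.1 with | some c => st.1 ++ [c] | none => st.1,
   match st.2.2.2.1 with | some c => st.2.1 ++ [c] | none => st.2.1)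

-- A's tail: one loop for both widths, a second loop appending the lines
def aFormat (word : List Char) (bounds : List (Int × Int)) : String :=
  let ws := bounds.foldl
    (fun (w : Nat × Nat) b => (max w.1 (PySem.Int.toChars b.1).length, max w.2 (PySem.Int.toChars b.2).length))
    (0, 0)
  let lines := bounds.foldl
    (fun (acc : List (List Char)) b =>
      acc ++ [word ++ [' '] ++ pvPad ws.1 b.1 ++ " eV to ".toList ++ pvPad ws.2 b.2 ++ [' ', 'e', 'V']])
    []
  pvPreformatted (PySem.Chars.join ['\n'] lines)

def get_ev_range_tooltip (bitmask : Int) (range_def : List Int) : String :=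
  let st := (PySem.List.enumerate range_def).foldl (aStep bitmask) ([], [], none, none, 0)
  let bb := aFinish st
  if bb.2 = [] ∨ (bb.1 ≠ [] ∧ bb.1.length < bb.2.length) then aFormat "Allow".toList bb.1
  else aFormat "Block".toList bb.2

-- ===== PORT B =====
-- Python's 'p != t' for p an Optional[bool] carried in the shifted flag lists (None != t is True)
def pvNeO (p : Option Bool) (t : Bool) : Bool :=
  match p with
  | none => true
  | some b => b != t

-- flags = [(bitmask >> bit) % 2 == 1 for bit, _ in enumerate(evs)]
def bFlags (bitmask : Int) (evs : List Int) : List Bool :=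
  (PySem.List.enumerate evs).map (fun p => PySem.Int.mod (bitmask >>> p.1) 2 == 1)

-- runs(t): run starts / run ends by comparison with the shifted flag lists, zipped;
-- Python's three-argument zip(a, b, c) is ported as a.zip (b.zip c) (same truncation)
def bRuns (evs : List Int) (flags : List Bool) (t : Bool) : List (Int × Int) :=
  let los := (((0 :: evs).zip (flags.zip (none :: flags.map some))).filter
      (fun x => x.2.1 == t && pvNeO x.2.2 t)).map (fun x => x.1)
  let his := ((evs.zip (flags.zip ((flags.drop 1).map some ++ [none]))).filter
      (fun x => x.2.1 == t && pvNeO x.2.2 t)).map (fun x => x.1)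
  los.zip his

-- B's tail: widths as maxima with default 0, lines as a comprehension
def bFormat (word : List Char) (bounds : List (Int × Int)) : String :=
  let lw := PySem.List.maxD (bounds.map (fun b => (PySem.Int.toChars b.1).length)) id 0
  let rw := PySem.List.maxD (bounds.map (fun b => (PySem.Int.toChars b.2).length)) id 0
  let lines := bounds.map
    (fun b => word ++ [' '] ++ pvPad lw b.1 ++ " eV to ".toList ++ pvPad rw b.2 ++ [' ', 'e', 'V'])
  pvPreformatted (PySem.Chars.join ['\n'] lines)

def get_ev_range_tooltip_alt (bitmask : Int) (range_def : List Int) : String :=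
  -- int(ev) is the identity on Int, so evs = range_def
  let flags := bFlags bitmask range_def
  let okb := bRuns range_def flags true
  let badb := bRuns range_def flags false
  if badb = [] ∨ (okb ≠ [] ∧ okb.length < badb.length) then bFormat "Allow".toList okb
  else bFormat "Block".toList badb

-- ===== PRECONDITION & SPEC =====
def Spec_get_ev_range_tooltip (bitmask : Int) (range_def : List Int) (out : String) : Prop := out = get_ev_range_tooltip_alt bitmask range_def
instance (bitmask : Int) (range_def : List Int) (out : String) : Decidable (Spec_get_ev_range_tooltip bitmask range_def out) := by unfold Spec_get_ev_range_tooltip; infer_instance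

-- ===== CLAIM (what is proved, stated in full; the proofs are below) =====
def Claim_equal_get_ev_range_tooltip : Prop := ∀ (bitmask : Int) (range_def : List Int), Dom_get_ev_range_tooltip bitmask range_def → Spec_get_ev_range_tooltip bitmask range_def (get_ev_range_tooltip bitmask range_def)

-- ===== LEMMAS AND PROOFS =====

-- the per-bit triples (lower bound, upper bound, flag), as a structural recursion
def tripsFrom (bitmask : Int) (b prev : Int) : List Int → List (Int × Int × Bool)
  | [] => []
  | ev :: l => (prev, ev, PySem.Int.mod (bitmask >>> b) 2 == 1) :: tripsFrom bitmask (b + 1) ev l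

-- the flag of each bit, as a structural recursion
def flagsFrom (bitmask : Int) (b : Int) : List Int → List Bool
  | [] => []
  | _ :: l => (PySem.Int.mod (bitmask >>> b) 2 == 1) :: flagsFrom bitmask (b + 1) l

-- maximal runs of equal flag, collapsed to (flag, first lower bound, last upper bound)
def bGroupGo (flag : Bool) (lo hi : Int) : List (Int × Int × Bool) → List (Bool × Int × Int)
  | [] => [(flag, lo, hi)]
  | t :: ts =>
    if t.2.2 = flag then bGroupGo flag lo t.2.1 ts
    else (flag, lo, hi) :: bGroupGo t.2.2 t.1 t.2.1 ts

def bGroupRuns : List (Int × Int × Bool) → List (Bool × Int × Int)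
  | [] => []
  | t :: ts => bGroupGo t.2.2 t.1 t.2.1 ts

def okOf (rs : List (Bool × Int × Int)) : List (Int × Int) := (rs.filter (fun g => g.1)).map (fun g => g.2)
def badOf (rs : List (Bool × Int × Int)) : List (Int × Int) := (rs.filter (fun g => !g.1)).map (fun g => g.2)
def runsOf (t : Bool) (rs : List (Bool × Int × Int)) : List (Int × Int) := (rs.filter (fun g => g.1 == t)).map (fun g => g.2)

-- B's boundary detectors, as structural recursions over the triples
def losR (t : Bool) (p : Option Bool) : List (Int × Int × Bool) → List Int
  | [] => []
  | x :: T => (if x.2.2 == t && pvNeO p t then [x.1] else []) ++ losR t (some x.2.2) T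

def hisC (t f : Bool) (hi : Int) : List (Int × Int × Bool) → List Int
  | [] => if f == t then [hi] else []
  | x :: T => (if f == t && pvNeO (some x.2.2) t then [hi] else []) ++ hisC t x.2.2 x.2.1 T

def hisFull (t : Bool) : List (Int × Int × Bool) → List Int
  | [] => []
  | x :: T => hisC t x.2.2 x.2.1 T

-- the four possible loop-body transitions of A
lemma aStep_bad_bad (bitmask : Int) (okb badb : List (Int × Int)) (lo hi prev b ev : Int)
    (h : PySem.Int.mod (bitmask >>> b) 2 = 0) :
    aStep bitmask (okb, badb, none, some (lo, hi), prev) (b, ev)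
      = (okb, badb, none, some (lo, ev), ev) := by
  simp only [aStep]; rw [if_neg (by rw [h]; simp)]

lemma aStep_ok_bad (bitmask : Int) (okb badb : List (Int × Int)) (lo hi prev b ev : Int)
    (h : PySem.Int.mod (bitmask >>> b) 2 = 0) :
    aStep bitmask (okb, badb, some (lo, hi), none, prev) (b, ev)
      = (okb ++ [(lo, hi)], badb, none, some (prev, ev), ev) := by
  simp only [aStep]; rw [if_neg (by rw [h]; simp)]

lemma aStep_bad_ok (bitmask : Int) (okb badb : List (Int × Int)) (lo hi prev b ev : Int)
    (h : PySem.Int.mod (bitmask >>> b) 2 = 1) :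
    aStep bitmask (okb, badb, none, some (lo, hi), prev) (b, ev)
      = (okb, badb ++ [(lo, hi)], some (prev, ev), none, ev) := by
  simp only [aStep]; rw [if_pos (by rw [h]; simp)]

lemma aStep_ok_ok (bitmask : Int) (okb badb : List (Int × Int)) (lo hi prev b ev : Int)
    (h : PySem.Int.mod (bitmask >>> b) 2 = 1) :
    aStep bitmask (okb, badb, some (lo, hi), none, prev) (b, ev)
      = (okb, badb, some (lo, ev), none, ev) := by
  simp only [aStep]; rw [if_pos (by rw [h]; simp)]

lemma aStep_none_bad (bitmask : Int) (prev b ev : Int)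
    (h : PySem.Int.mod (bitmask >>> b) 2 = 0) :
    aStep bitmask ([], [], none, none, prev) (b, ev)
      = ([], [], none, some (prev, ev), ev) := by
  simp only [aStep]; rw [if_neg (by rw [h]; simp)]

lemma aStep_none_ok (bitmask : Int) (prev b ev : Int)
    (h : PySem.Int.mod (bitmask >>> b) 2 = 1) :
    aStep bitmask ([], [], none, none, prev) (b, ev)
      = ([], [], some (prev, ev), none, ev) := by
  simp only [aStep]; rw [if_pos (by rw [h]; simp)]

-- A-side invariant: A's loop from a state with exactly one open bound equals run collapsing
lemma main_inv (bitmask : Int) (l : List Int) :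
    ∀ (b prev : Int) (okb badb : List (Int × Int)) (flag : Bool) (lo hi : Int),
      aFinish ((PySem.List.enumerate l b).foldl (aStep bitmask)
        (okb, badb, cond flag (some (lo, hi)) none, cond flag none (some (lo, hi)), prev))
      = (okb ++ okOf (bGroupGo flag lo hi (tripsFrom bitmask b prev l)),
         badb ++ badOf (bGroupGo flag lo hi (tripsFrom bitmask b prev l))) := by
  induction l with
  | nil =>
    intro b prev okb badb flag lo hi
    cases flag <;>
      simp [PySem.List.enumerate_nil, tripsFrom, bGroupGo, aFinish, okOf, badOf]
  | cons ev l ih =>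
    intro b prev okb badb flag lo hi
    rw [PySem.List.enumerate_cons]
    simp only [List.foldl_cons, tripsFrom]
    rcases PySem.Int.mod_two_eq (bitmask >>> b) with h | h
    · have hb : (PySem.Int.mod (bitmask >>> b) 2 == 1) = false := by rw [h]; decide
      rw [hb]
      cases flag
      · simp only [Bool.cond_false]
        rw [aStep_bad_bad bitmask okb badb lo hi prev b ev h]
        have H := ih (b + 1) ev okb badb false lo ev
        simp only [Bool.cond_false] at H
        rw [H]
        simp [bGroupGo]
      · simp only [Bool.cond_true]
        rw [aStep_ok_bad bitmask okb badb lo hi prev b ev h]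
        have H := ih (b + 1) ev (okb ++ [(lo, hi)]) badb false prev ev
        simp only [Bool.cond_false] at H
        rw [H]
        have : bGroupGo true lo hi ((prev, ev, false) :: tripsFrom bitmask (b + 1) ev l)
            = (true, lo, hi) :: bGroupGo false prev ev (tripsFrom bitmask (b + 1) ev l) := by
          simp [bGroupGo]
        rw [this]
        simp [okOf, badOf]
    · have hb : (PySem.Int.mod (bitmask >>> b) 2 == 1) = true := by rw [h]; decide
      rw [hb]
      cases flag
      · simp only [Bool.cond_false]
        rw [aStep_bad_ok bitmask okb badb lo hi prev b ev h]
        have H := ih (b + 1) ev okb (badb ++ [(lo, hi)]) true prev ev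
        simp only [Bool.cond_true] at H
        rw [H]
        have : bGroupGo false lo hi ((prev, ev, true) :: tripsFrom bitmask (b + 1) ev l)
            = (false, lo, hi) :: bGroupGo true prev ev (tripsFrom bitmask (b + 1) ev l) := by
          simp [bGroupGo]
        rw [this]
        simp [okOf, badOf]
      · simp only [Bool.cond_true]
        rw [aStep_ok_ok bitmask okb badb lo hi prev b ev h]
        have H := ih (b + 1) ev okb badb true lo ev
        simp only [Bool.cond_true] at H
        rw [H]
        simp [bGroupGo]

lemma start_inv (bitmask : Int) (l : List Int) (b prev : Int) :
    aFinish ((PySem.List.enumerate l b).foldl (aStep bitmask) ([], [], none, none, prev))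
      = (okOf (bGroupRuns (tripsFrom bitmask b prev l)),
         badOf (bGroupRuns (tripsFrom bitmask b prev l))) := by
  cases l with
  | nil => simp [PySem.List.enumerate_nil, tripsFrom, bGroupRuns, aFinish, okOf, badOf]
  | cons ev l =>
    rw [PySem.List.enumerate_cons]
    simp only [List.foldl_cons, tripsFrom, bGroupRuns]
    rcases PySem.Int.mod_two_eq (bitmask >>> b) with h | h
    · have hb : (PySem.Int.mod (bitmask >>> b) 2 == 1) = false := by rw [h]; decide
      rw [hb, aStep_none_bad bitmask prev b ev h]
      have H := main_inv bitmask l (b + 1) ev [] [] false prev ev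
      simp only [Bool.cond_false] at H
      simpa using H
    · have hb : (PySem.Int.mod (bitmask >>> b) 2 == 1) = true := by rw [h]; decide
      rw [hb, aStep_none_ok bitmask prev b ev h]
      have H := main_inv bitmask l (b + 1) ev [] [] true prev ev
      simp only [Bool.cond_true] at H
      simpa using H

lemma okOf_eq_runsOf (rs : List (Bool × Int × Int)) : okOf rs = runsOf true rs := by
  simp [okOf, runsOf]

lemma badOf_eq_runsOf (rs : List (Bool × Int × Int)) : badOf rs = runsOf false rs := by
  simp [badOf, runsOf]

-- core lemma: the runs of status t of a collapsed group list are the zip of the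
-- start bounds and end bounds detected by neighbour comparison
lemma runsOf_cons (t : Bool) (g : Bool × Int × Int) (rs : List (Bool × Int × Int)) :
    runsOf t (g :: rs) = (if g.1 == t then [g.2] else []) ++ runsOf t rs := by
  by_cases h : (g.1 == t) = true <;> simp [runsOf, h]

-- core lemma: the runs of status t of a collapsed group list are the zip of the
-- start bounds and end bounds detected by neighbour comparison
lemma run_zip (t : Bool) (T : List (Int × Int × Bool)) :
    ∀ (flag : Bool) (lo hi : Int),
    runsOf t (bGroupGo flag lo hi T)
      = ((if flag == t then [lo] else []) ++ losR t (some flag) T).zip (hisC t flag hi T) := by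
  induction T with
  | nil =>
    intro flag lo hi
    cases flag <;> cases t <;> simp [bGroupGo, runsOf, losR, hisC]
  | cons x T ih =>
    intro flag lo hi
    obtain ⟨lo2, hi2, f2⟩ := x
    by_cases hf : f2 = flag
    · subst hf
      have h1 : bGroupGo f2 lo hi ((lo2, hi2, f2) :: T) = bGroupGo f2 lo hi2 T := by
        simp [bGroupGo]
      have h2 : losR t (some f2) ((lo2, hi2, f2) :: T) = losR t (some f2) T := by
        cases f2 <;> cases t <;> simp [losR, pvNeO]
      have h3 : hisC t f2 hi ((lo2, hi2, f2) :: T) = hisC t f2 hi2 T := by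
        cases f2 <;> cases t <;> simp [hisC, pvNeO]
      rw [h1, h2, h3, ih f2 lo hi2]
    · have h1 : bGroupGo flag lo hi ((lo2, hi2, f2) :: T)
          = (flag, lo, hi) :: bGroupGo f2 lo2 hi2 T := by
        simp [bGroupGo, hf]
      have h2 : losR t (some flag) ((lo2, hi2, f2) :: T)
          = (if f2 == t then [lo2] else []) ++ losR t (some f2) T := by
        cases f2 <;> cases flag <;> cases t <;> simp_all [losR, pvNeO]
      have h3 : hisC t flag hi ((lo2, hi2, f2) :: T)
          = (if flag == t then [hi] else []) ++ hisC t f2 hi2 T := by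
        cases f2 <;> cases flag <;> cases t <;> simp_all [hisC, pvNeO]
      rw [h1, runsOf_cons, h2, h3, ih f2 lo2 hi2]
      cases flag <;> cases t <;> cases f2 <;> simp_all

lemma run_zip_full (t : Bool) (T : List (Int × Int × Bool)) :
    runsOf t (bGroupRuns T) = (losR t none T).zip (hisFull t T) := by
  cases T with
  | nil => simp [bGroupRuns, runsOf, losR, hisFull]
  | cons x T =>
    obtain ⟨lo, hi, f⟩ := x
    simp only [bGroupRuns, hisFull, losR, pvNeO, Bool.and_true]
    exact run_zip t T f lo hi

-- bridge: B's flag list is flagsFrom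
lemma flags_eq (bitmask : Int) (l : List Int) : ∀ (b : Int),
    (PySem.List.enumerate l b).map (fun p => PySem.Int.mod (bitmask >>> p.1) 2 == 1)
      = flagsFrom bitmask b l := by
  induction l with
  | nil => intro b; simp [PySem.List.enumerate_nil, flagsFrom]
  | cons ev l ih =>
    intro b
    rw [PySem.List.enumerate_cons, List.map_cons, flagsFrom]
    exact congrArg _ (ih (b + 1))

-- bridge: B's start-bound comprehension is losR over the triples
lemma los_bridge (bitmask : Int) (t : Bool) (l : List Int) :
    ∀ (b prev : Int) (pOpt : Option Bool),
    (((prev :: l).zip ((flagsFrom bitmask b l).zip (pOpt :: (flagsFrom bitmask b l).map some))).filter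
        (fun x => x.2.1 == t && pvNeO x.2.2 t)).map (fun x => x.1)
      = losR t pOpt (tripsFrom bitmask b prev l) := by
  induction l with
  | nil => intro b prev pOpt; simp [flagsFrom, tripsFrom, losR]
  | cons ev l ih =>
    intro b prev pOpt
    simp only [flagsFrom, tripsFrom, List.map_cons, List.zip_cons_cons, List.filter_cons,
      losR]
    by_cases hc : ((PySem.Int.mod (bitmask >>> b) 2 == 1) == t && pvNeO pOpt t) = true
    · rw [if_pos hc, if_pos hc]
      rw [List.map_cons, List.singleton_append]
      exact congrArg _ (ih (b + 1) ev (some (PySem.Int.mod (bitmask >>> b) 2 == 1)))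
    · rw [if_neg hc, if_neg hc, List.nil_append]
      exact ih (b + 1) ev (some (PySem.Int.mod (bitmask >>> b) 2 == 1))

-- bridge: B's end-bound comprehension is hisC over the triples
lemma his_bridge_go (bitmask : Int) (t : Bool) (l : List Int) :
    ∀ (b e : Int) (f0 : Bool),
    (((e :: l).zip ((f0 :: flagsFrom bitmask b l).zip ((flagsFrom bitmask b l).map some ++ [none]))).filter
        (fun x => x.2.1 == t && pvNeO x.2.2 t)).map (fun x => x.1)
      = hisC t f0 e (tripsFrom bitmask b e l) := by
  induction l with
  | nil =>
    intro b e f0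
    cases f0 <;> cases t <;> simp [flagsFrom, tripsFrom, hisC, pvNeO]
  | cons ev l ih =>
    intro b e f0
    simp only [flagsFrom, tripsFrom, List.map_cons, List.cons_append, List.zip_cons_cons,
      List.filter_cons, hisC]
    by_cases hc : (f0 == t && pvNeO (some (PySem.Int.mod (bitmask >>> b) 2 == 1)) t) = true
    · rw [if_pos hc, if_pos hc]
      rw [List.map_cons, List.singleton_append]
      exact congrArg _ (ih (b + 1) ev (PySem.Int.mod (bitmask >>> b) 2 == 1))
    · rw [if_neg hc, if_neg hc, List.nil_append]
      exact ih (b + 1) ev (PySem.Int.mod (bitmask >>> b) 2 == 1)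

lemma his_bridge (bitmask : Int) (t : Bool) (l : List Int) (b prev : Int) :
    ((l.zip ((flagsFrom bitmask b l).zip (((flagsFrom bitmask b l).drop 1).map some ++ [none]))).filter
        (fun x => x.2.1 == t && pvNeO x.2.2 t)).map (fun x => x.1)
      = hisFull t (tripsFrom bitmask b prev l) := by
  cases l with
  | nil => simp [flagsFrom, tripsFrom, hisFull]
  | cons ev l =>
    simp only [flagsFrom, tripsFrom, List.drop_succ_cons, List.drop_zero, hisFull]
    exact his_bridge_go bitmask t l (b + 1) ev (PySem.Int.mod (bitmask >>> b) 2 == 1)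

-- assembled: B's runs(t) equals the runs of status t of the collapsed state machine
lemma bRuns_eq (bitmask : Int) (range_def : List Int) (t : Bool) :
    bRuns range_def (bFlags bitmask range_def) t
      = runsOf t (bGroupRuns (tripsFrom bitmask 0 0 range_def)) := by
  have hf : bFlags bitmask range_def = flagsFrom bitmask 0 range_def :=
    flags_eq bitmask range_def 0
  rw [run_zip_full]
  simp only [bRuns, hf]
  rw [los_bridge bitmask t range_def 0 0 none, his_bridge bitmask t range_def 0 0]

-- Nat maximum with default 0 (B's maxD) is A's running maximum
lemma maxD_id_nat (ys : List Nat) : PySem.List.maxD ys id 0 = ys.foldl max 0 := by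
  cases hy : PySem.List.max? ys id with
  | none =>
    have : ys = [] := (PySem.List.max?_eq_none_iff ys id).mp hy
    subst this
    rfl
  | some m =>
    have hm : m ∈ ys := PySem.List.max?_mem hy
    have hmax : ∀ y ∈ ys, id y ≤ id m := PySem.List.max?_isMax hy
    have h1 := PySem.List.le_foldl_max ys 0
    have h2 := PySem.List.foldl_max_mem ys 0
    simp only [PySem.List.maxD, hy, Option.getD_some]
    refine le_antisymm (h1.2 m hm) ?_
    rcases h2 with h | h
    · rw [h]; exact Nat.zero_le m
    · exact hmax _ h

lemma format_eq (word : List Char) (bounds : List (Int × Int)) :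
    aFormat word bounds = bFormat word bounds := by
  simp only [aFormat, bFormat]
  have hw := PySem.List.foldl_prod_mk
    (f := fun (acc : Nat) (p : Int × Int) => max acc (PySem.Int.toChars p.1).length)
    (g := fun (acc : Nat) (p : Int × Int) => max acc (PySem.Int.toChars p.2).length)
    bounds 0 0
  simp only [hw, maxD_id_nat, List.foldl_map, PySem.List.foldl_append_singleton_eq_map]
  simp

-- ===== VERDICT (by name: the statement is the Claim_ definition above) =====
theorem get_ev_range_tooltip_spec : Claim_equal_get_ev_range_tooltip := by
  intro bitmask range_def _
  unfold Spec_get_ev_range_tooltip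
  simp only [get_ev_range_tooltip, get_ev_range_tooltip_alt]
  rw [start_inv bitmask range_def 0 0]
  rw [bRuns_eq bitmask range_def true, bRuns_eq bitmask range_def false]
  simp only [okOf_eq_runsOf, badOf_eq_runsOf, format_eq]
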